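-- pv_equiv track=rewrite | github.com/kakao-aicoursework/bnep.park | chat_bot/database.py | get_manual_dict
-- ===== SOURCE A (Python) =====
-- from collections import defaultdict
--
-- def get_manual_dict(lines):
--     manual_dict = defaultdict(list)
--     manual_key = ""
--     for line in lines:
--         line = line.replace("\n", "")
--         if not line:
--             continue
--
--         if line[0] == "#":
--             manual_key = line.replace("#", "")
--         elif manual_key:
--             manual_dict[manual_key].append(line)
--         else:
--             continue
--
--     for key in manual_dict:
--         manual_dict[key] = "\n".join(manual_dict[key])
--
--     return manual_dict
-- ===== SOURCE B (Python) =====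
-- def get_manual_dict(lines):
--     cleaned = [s for s in (raw.replace("\n", "") for raw in lines) if s]
--     tagged = []
--     key = ""
--     for line in cleaned:
--         if line[0] == "#":
--             key = line.replace("#", "")
--         elif key:
--             tagged.append((key, line))
--     keys = list(dict.fromkeys(k for k, _ in tagged))
--     return {k: "\n".join(t for k2, t in tagged if k2 == k) for k in keys}
-- ===== Notes on version B (the rewrite author's own statement) =====
-- stated objective: alternative
-- what changed: B replaces A's incrementally-mutated per-key dict of line lists (plus a second join-over-keys pass) by a staged pipeline over a flat data structure: clean/filter the lines, tag each content line with its current section key into one flat (key, line) list, then build the result relationally by deduplicating the keys (dict.fromkeys) and gathering each key's text with a per-key filter-join.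
import Mathlib
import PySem

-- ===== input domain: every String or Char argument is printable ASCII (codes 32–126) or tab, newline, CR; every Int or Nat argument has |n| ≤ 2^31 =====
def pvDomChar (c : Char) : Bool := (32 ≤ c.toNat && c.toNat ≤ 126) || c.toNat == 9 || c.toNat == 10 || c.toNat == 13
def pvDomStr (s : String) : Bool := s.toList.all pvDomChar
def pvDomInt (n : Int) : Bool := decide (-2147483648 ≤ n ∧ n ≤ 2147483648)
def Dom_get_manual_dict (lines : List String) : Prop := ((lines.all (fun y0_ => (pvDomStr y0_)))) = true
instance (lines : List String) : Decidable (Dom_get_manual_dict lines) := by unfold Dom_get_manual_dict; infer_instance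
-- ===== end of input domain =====

-- B replaces A's per-key dict-of-lists accumulation (and its final join loop) by a staged pipeline:
-- clean/filter, tag lines into one flat (key, line) list, dedup the keys, per-key filter-join (alternative).


-- ===== PORT A =====
-- A's loop body; state = (manual_dict, manual_key)
def pvStepA (st : PySem.Dict String (List String) × String) (l : String) :
    PySem.Dict String (List String) × String :=
  let line := PySem.Str.replace l "\n" ""
  if line = "" then st
  else if PySem.Str.pyGet? line 0 = some '#' then (st.1, PySem.Str.replace line "#" "")
  else if st.2 ≠ "" then (st.1.modify st.2 [] (fun v => v ++ [line]), st.2)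
  else st

-- 'for key in manual_dict: manual_dict[key] = "\n".join(manual_dict[key])' rewrites each value
-- in place, keeping insertion order: ported as a map over the items (the value type changes).
def get_manual_dict (lines : List String) : List (String × String) :=
  (lines.foldl pvStepA (PySem.Dict.empty, "")).1.items.map (fun p => (p.1, PySem.Str.join "\n" p.2))

-- ===== PORT B =====
-- B's tagging loop over the cleaned lines; state = (tagged, key)
def pvTagStep (st : List (String × String) × String) (line : String) :
    List (String × String) × String :=
  if PySem.Str.pyGet? line 0 = some '#' then (st.1, PySem.Str.replace line "#" "")
  else if st.2 ≠ "" then (st.1 ++ [(st.2, line)], st.2)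
  else st

-- B's last two lines: dedup the keys, then per-key filter-join over the flat tagged list
def pvGroup (tagged : List (String × String)) : List (String × String) :=
  (PySem.List.dedup (tagged.map Prod.fst)).map
    (fun k => (k, PySem.Str.join "\n" ((tagged.filter (fun p => p.1 == k)).map (·.2))))

def get_manual_dict_alt (lines : List String) : List (String × String) :=
  pvGroup (((lines.map (fun raw => PySem.Str.replace raw "\n" "")).filter
    (fun s => s ≠ "")).foldl pvTagStep ([], "")).1

-- ===== PRECONDITION & SPEC =====
def Spec_get_manual_dict (lines : List String) (out : List (String × String)) : Prop := out = get_manual_dict_alt lines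
instance (lines : List String) (out : List (String × String)) : Decidable (Spec_get_manual_dict lines out) := by unfold Spec_get_manual_dict; infer_instance

-- ===== CLAIM (what is proved, stated in full; the proofs are below) =====
def Claim_equal_get_manual_dict : Prop := ∀ (lines : List String), Dom_get_manual_dict lines → Spec_get_manual_dict lines (get_manual_dict lines)

-- ===== LEMMAS AND PROOFS =====

-- B's tag fold seen over the RAW lines (cleaning folded in)
def pvTagRaw (st : List (String × String) × String) (raw : String) :
    List (String × String) × String :=
  if PySem.Str.replace raw "\n" "" ≠ "" then pvTagStep st (PySem.Str.replace raw "\n" "") else st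

-- A's dict-accumulation step, as folded over the tagged list
def pvModStep (d : PySem.Dict String (List String)) (p : String × String) :
    PySem.Dict String (List String) :=
  d.modify p.1 [] (fun v => v ++ [p.2])

theorem pv_tag_append (lines : List String) :
    ∀ (tg : List (String × String)) (key : String),
      lines.foldl pvTagRaw (tg, key) =
        (tg ++ (lines.foldl pvTagRaw ([], key)).1, (lines.foldl pvTagRaw ([], key)).2) := by
  induction lines with
  | nil => intro tg key; simp
  | cons raw rest ih =>
    intro tg key
    simp only [List.foldl_cons]
    by_cases h1 : PySem.Str.replace raw "\n" "" = ""
    · have e : ∀ t : List (String × String), pvTagRaw (t, key) raw = (t, key) := by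
        intro t; simp [pvTagRaw, h1]
      rw [e tg, e []]; exact ih tg key
    · by_cases h2 : PySem.List.pyGet? (PySem.Chars.replace raw.toList ['\n'] []) 0 = some '#'
      · have e : ∀ t : List (String × String), pvTagRaw (t, key) raw =
            (t, PySem.Str.replace (PySem.Str.replace raw "\n" "") "#" "") := by
          intro t; simp [pvTagRaw, pvTagStep, h1, h2]
        rw [e tg, e []]; exact ih tg _
      · by_cases h3 : key = ""
        · have e : ∀ t : List (String × String), pvTagRaw (t, key) raw = (t, key) := by
            intro t; simp [pvTagRaw, pvTagStep, h1, h2, h3]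
          rw [e tg, e []]; exact ih tg key
        · have e : ∀ t : List (String × String), pvTagRaw (t, key) raw =
              (t ++ [(key, PySem.Str.replace raw "\n" "")], key) := by
            intro t; simp [pvTagRaw, pvTagStep, h1, h2, h3]
          rw [e tg, e []]
          simp only [List.nil_append]
          rw [ih (tg ++ [(key, PySem.Str.replace raw "\n" "")]) key,
              ih [(key, PySem.Str.replace raw "\n" "")] key]
          simp

theorem pv_main (lines : List String) :
    ∀ (d : PySem.Dict String (List String)) (key : String),
      lines.foldl pvStepA (d, key) =
        ((lines.foldl pvTagRaw ([], key)).1.foldl pvModStep d,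
         (lines.foldl pvTagRaw ([], key)).2) := by
  induction lines with
  | nil => intro d key; simp
  | cons raw rest ih =>
    intro d key
    simp only [List.foldl_cons]
    by_cases h1 : PySem.Str.replace raw "\n" "" = ""
    · have eA : pvStepA (d, key) raw = (d, key) := by simp [pvStepA, h1]
      have eT : pvTagRaw ([], key) raw = ([], key) := by simp [pvTagRaw, h1]
      rw [eA, eT]; exact ih d key
    · by_cases h2 : PySem.List.pyGet? (PySem.Chars.replace raw.toList ['\n'] []) 0 = some '#'
      · have eA : pvStepA (d, key) raw =
            (d, PySem.Str.replace (PySem.Str.replace raw "\n" "") "#" "") := by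
          simp [pvStepA, h1, h2]
        have eT : pvTagRaw ([], key) raw =
            ([], PySem.Str.replace (PySem.Str.replace raw "\n" "") "#" "") := by
          simp [pvTagRaw, pvTagStep, h1, h2]
        rw [eA, eT]; exact ih d _
      · by_cases h3 : key = ""
        · have eA : pvStepA (d, key) raw = (d, key) := by simp [pvStepA, h1, h2, h3]
          have eT : pvTagRaw ([], key) raw = ([], key) := by simp [pvTagRaw, pvTagStep, h1, h2, h3]
          rw [eA, eT]; exact ih d key
        · have eA : pvStepA (d, key) raw =
              (d.modify key [] (fun v => v ++ [PySem.Str.replace raw "\n" ""]), key) := by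
            simp [pvStepA, h1, h2, h3]
          have eT : pvTagRaw ([], key) raw = ([(key, PySem.Str.replace raw "\n" "")], key) := by
            simp [pvTagRaw, pvTagStep, h1, h2, h3]
          rw [eA, eT, ih _ key, pv_tag_append rest [(key, PySem.Str.replace raw "\n" "")] key]
          simp [pvModStep]

-- ===== VERDICT (by name: the statement is the Claim_ definition above) =====
theorem get_manual_dict_spec : Claim_equal_get_manual_dict := by
  intro lines _
  unfold Spec_get_manual_dict get_manual_dict get_manual_dict_alt
  -- B's fold over the cleaned lines is the fold of pvTagRaw over the raw lines
  have hclean :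
      (((lines.map (fun raw => PySem.Str.replace raw "\n" "")).filter
          (fun s => s ≠ "")).foldl pvTagStep ([], "")) =
        lines.foldl pvTagRaw ([], "") := by
    rw [← PySem.List.foldl_ite_eq_foldl_filter (fun s => s ≠ "") pvTagStep, List.foldl_map]
    rfl
  rw [hclean, pv_main lines PySem.Dict.empty ""]
  unfold pvGroup
  set tagged := (lines.foldl pvTagRaw ([], "")).1 with htg
  have hnd : (tagged.foldl pvModStep PySem.Dict.empty).keys.Nodup := by
    unfold pvModStep
    exact PySem.Dict.nodup_keys_foldl_modify_key tagged Prod.fst []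
      (fun _ p => fun v => v ++ [p.2]) PySem.Dict.empty (by simp)
  have hkeys : (tagged.foldl pvModStep PySem.Dict.empty).keys =
      PySem.List.dedup (tagged.map Prod.fst) := by
    unfold pvModStep
    rw [PySem.Dict.keys_foldl_modify_key]
    simp [PySem.Set.update_nil_left]
  rw [PySem.Dict.items_eq_map_keys _ hnd ([] : List String), List.map_map, hkeys]
  apply List.map_congr_left
  intro k _
  have hgd : (tagged.foldl pvModStep PySem.Dict.empty).getD k [] =
      (tagged.filter (fun p => p.1 == k)).map (·.2) := by
    unfold pvModStep
    rw [PySem.Dict.getD_foldl_modify_append]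
    simp
  simp [Function.comp, hgd]
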